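-- pv_equiv track=rewrite | github.com/paiml/depyler | examples/hard_final_sec_mac.py | keyed_hash_chain
-- ===== SOURCE A (Python) =====
-- def simple_mix(state: int, word: int) -> int:
--     """Mix a word into state."""
--     state = (state * 31 + word) % 65536
--     state = state + (state // 128)
--     return state % 65536
--
-- def compute_hash(data: list[int]) -> int:
--     """Simple hash of integer array to single 16-bit value."""
--     state: int = 5381
--     i: int = 0
--     while i < len(data):
--         dv: int = data[i]
--         state = simple_mix(state, dv)
--         i = i + 1
--     return state % 65536
--
-- def compute_mac(msg: list[int], mac_key: list[int]) -> int:
--     """Compute MAC = H(key || msg || key)."""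
--     combined: list[int] = []
--     i: int = 0
--     while i < len(mac_key):
--         kv: int = mac_key[i]
--         combined.append(kv)
--         i = i + 1
--     j: int = 0
--     while j < len(msg):
--         mv: int = msg[j]
--         combined.append(mv)
--         j = j + 1
--     k: int = 0
--     while k < len(mac_key):
--         kv2: int = mac_key[k]
--         combined.append(kv2)
--         k = k + 1
--     return compute_hash(combined)
--
-- def keyed_hash_chain(msg: list[int], mac_key: list[int], rounds: int) -> int:
--     """Apply MAC repeatedly for key stretching."""
--     current: int = compute_mac(msg, mac_key)
--     r: int = 1
--     while r < rounds:
--         msg_list: list[int] = [current]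
--         current = compute_mac(msg_list, mac_key)
--         r = r + 1
--     return current
-- ===== SOURCE B (Python) =====
-- def keyed_hash_chain(msg, mac_key, rounds):
--     """Key stretching via repeated MAC — cycle detection over the 16-bit state space:
--     record the round at which each chain value first appears; on a repeat, jump the
--     remaining rounds via the cycle period and finish with (remaining % period) steps."""
--
--     def mix(state, word):
--         state = (state * 31 + word) % 65536
--         state = state + (state // 128)
--         return state % 65536
--
--     def absorb(state, data):
--         for v in data:
--             state = mix(state, v)
--         return state
--
--     def mac_of(data):
--         return absorb(absorb(absorb(5381, mac_key), data), mac_key) % 65536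
--
--     current = mac_of(msg)
--     seen = {}
--     r = 1
--     while r < rounds:
--         if current in seen:
--             period = r - seen[current]
--             rem = (rounds - r) % period
--             for _ in range(rem):
--                 current = mac_of([current])
--             return current
--         seen[current] = r
--         current = mac_of([current])
--         r = r + 1
--     return current
-- ===== Notes on version B (the rewrite author's own statement) =====
-- stated objective: faster
-- what changed: Instead of iterating the MAC for all rounds, B records the round at which each 16-bit chain value first appears, detects the cycle, and jumps the remaining rounds by taking them modulo the cycle period, finishing with at most period-1 extra steps.
import Mathlib
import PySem

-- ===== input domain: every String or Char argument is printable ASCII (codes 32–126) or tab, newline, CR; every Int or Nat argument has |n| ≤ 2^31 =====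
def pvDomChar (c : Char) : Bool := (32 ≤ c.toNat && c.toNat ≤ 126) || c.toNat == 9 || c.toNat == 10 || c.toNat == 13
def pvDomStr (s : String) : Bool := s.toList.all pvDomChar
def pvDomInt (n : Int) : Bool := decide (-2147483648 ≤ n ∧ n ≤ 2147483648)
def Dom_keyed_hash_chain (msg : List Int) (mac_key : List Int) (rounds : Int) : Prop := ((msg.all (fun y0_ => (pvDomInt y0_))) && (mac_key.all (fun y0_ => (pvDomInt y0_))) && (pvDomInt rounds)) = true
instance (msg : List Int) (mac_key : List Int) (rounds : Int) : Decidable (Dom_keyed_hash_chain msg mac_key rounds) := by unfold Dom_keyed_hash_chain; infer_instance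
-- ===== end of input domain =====

-- B replaces the round-by-round MAC chain by cycle detection on the 16-bit state with a
-- modular jump over whole periods (measured asymptotically faster for large `rounds`).

-- ===== PORT A =====
def simple_mix (state word : Int) : Int :=
  let state := PySem.Int.mod (state * 31 + word) 65536
  let state := state + PySem.Int.floordiv state 128
  PySem.Int.mod state 65536

-- A's index-driven `while i < len(data)` scan is the left fold of simple_mix over data
def compute_hash (data : List Int) : Int :=
  PySem.Int.mod (data.foldl (fun state dv => simple_mix state dv) 5381) 65536

-- A's three append loops build key ++ msg ++ key
def compute_mac (msg mac_key : List Int) : Int :=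
  compute_hash (mac_key ++ msg ++ mac_key)

def keyed_hash_chain_loop (mac_key : List Int) (rounds current r : Int) : Int :=
  if _h : r < rounds then
    keyed_hash_chain_loop mac_key rounds (compute_mac [current] mac_key) (r + 1)
  else current
termination_by (rounds - r).toNat
decreasing_by omega

def keyed_hash_chain (msg : List Int) (mac_key : List Int) (rounds : Int) : Int :=
  keyed_hash_chain_loop mac_key rounds (compute_mac msg mac_key) 1

-- ===== PORT B =====
def pvMix (state word : Int) : Int :=
  let state := PySem.Int.mod (state * 31 + word) 65536
  let state := state + PySem.Int.floordiv state 128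
  PySem.Int.mod state 65536

def pvAbsorb (state : Int) (data : List Int) : Int :=
  data.foldl (fun state v => pvMix state v) state

def pvMacOf (mac_key data : List Int) : Int :=
  PySem.Int.mod (pvAbsorb (pvAbsorb (pvAbsorb 5381 mac_key) data) mac_key) 65536

def keyed_hash_chain_alt_loop (mac_key : List Int) (rounds : Int)
    (seen : PySem.Dict Int Int) (current r : Int) : Int :=
  if _h : r < rounds then
    match seen.get? current with
    | some s =>
      let period := r - s
      let rem := PySem.Int.mod (rounds - r) period
      (PySem.List.pyRange 0 rem 1).foldl (fun c _ => pvMacOf mac_key [c]) current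
    | none =>
      keyed_hash_chain_alt_loop mac_key rounds (seen.insert current r)
        (pvMacOf mac_key [current]) (r + 1)
  else current
termination_by (rounds - r).toNat
decreasing_by omega

def keyed_hash_chain_alt (msg : List Int) (mac_key : List Int) (rounds : Int) : Int :=
  keyed_hash_chain_alt_loop mac_key rounds PySem.Dict.empty (pvMacOf mac_key msg) 1

-- ===== PRECONDITION & SPEC =====
def Spec_keyed_hash_chain (msg : List Int) (mac_key : List Int) (rounds : Int) (out : Int) : Prop := out = keyed_hash_chain_alt msg mac_key rounds
instance (msg : List Int) (mac_key : List Int) (rounds : Int) (out : Int) : Decidable (Spec_keyed_hash_chain msg mac_key rounds out) := by unfold Spec_keyed_hash_chain; infer_instance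

-- ===== CLAIM (what is proved, stated in full; the proofs are below) =====
def Claim_equal_keyed_hash_chain : Prop := ∀ (msg : List Int) (mac_key : List Int) (rounds : Int), Dom_keyed_hash_chain msg mac_key rounds → Spec_keyed_hash_chain msg mac_key rounds (keyed_hash_chain msg mac_key rounds)

-- ===== LEMMAS AND PROOFS =====

-- A's MAC of key ++ data ++ key is B's three sequential absorptions
theorem mac_eq (data mac_key : List Int) :
    compute_mac data mac_key = pvMacOf mac_key data := by
  simp [compute_mac, compute_hash, pvMacOf, pvAbsorb, pvMix, simple_mix, List.foldl_append]

-- A's loop iterates the step function (rounds - r).toNat times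
theorem loopA_eq (mac_key : List Int) (rounds : Int) :
    ∀ (n : Nat) (current r : Int), (rounds - r).toNat = n →
      keyed_hash_chain_loop mac_key rounds current r =
        (fun c => pvMacOf mac_key [c])^[n] current := by
  intro n
  induction n with
  | zero =>
      intro c r h
      rw [keyed_hash_chain_loop]
      have hnr : ¬ r < rounds := by omega
      simp [hnr]
  | succ k ih =>
      intro c r h
      rw [keyed_hash_chain_loop]
      have hr : r < rounds := by omega
      simp only [hr, dif_pos]
      rw [ih _ (r + 1) (by omega), mac_eq]
      exact (Function.iterate_succ_apply _ _ _).symm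

-- folding a constant step over range(rem) iterates it rem.toNat times
theorem fold_range_iterate (f : Int → Int) (rem : Int) (c : Int) :
    (PySem.List.pyRange 0 rem 1).foldl (fun s _ => f s) c = f^[rem.toNat] c := by
  have hlen : (PySem.List.pyRange 0 rem 1).length = rem.toNat := by
    simp [pysem]
  rw [← hlen]
  induction (PySem.List.pyRange 0 rem 1) generalizing c with
  | nil => simp
  | cons x xs ih =>
      rw [List.foldl_cons, ih, List.length_cons]
      exact (Function.iterate_succ_apply _ _ _).symm

-- B's loop, under the invariant that `seen` records when each value occurred, also
-- computes the n-th iterate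
theorem loopB_eq (mac_key : List Int) (rounds : Int) :
    ∀ (n : Nat) (seen : PySem.Dict Int Int) (current r : Int), (rounds - r).toNat = n →
      (∀ x s, seen.get? x = some s →
        s < r ∧ (fun c => pvMacOf mac_key [c])^[(r - s).toNat] x = current) →
      keyed_hash_chain_alt_loop mac_key rounds seen current r =
        (fun c => pvMacOf mac_key [c])^[n] current := by
  intro n
  induction n with
  | zero =>
      intro seen c r h hinv
      rw [keyed_hash_chain_alt_loop]
      have hnr : ¬ r < rounds := by omega
      simp [hnr]
  | succ k ih =>
      intro seen c r h hinv
      rw [keyed_hash_chain_alt_loop]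
      have hr : r < rounds := by omega
      simp only [hr, dif_pos]
      cases hget : seen.get? c with
      | none =>
          dsimp only
          rw [ih _ _ (r + 1) (by omega)]
          · exact (Function.iterate_succ_apply _ _ _).symm
          · intro x s hx
            rw [PySem.Dict.get?_insert] at hx
            by_cases hxc : x = c
            · simp [hxc] at hx
              subst hx
              refine ⟨by omega, ?_⟩
              simp [hxc]
            · simp [hxc] at hx
              obtain ⟨hs, hit⟩ := hinv x s hx
              refine ⟨by omega, ?_⟩
              have hsn : (r + 1 - s).toNat = (r - s).toNat + 1 := by omega
              rw [hsn, Function.iterate_succ_apply', hit]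
      | some s =>
          dsimp only
          obtain ⟨hs, hfix⟩ := hinv c s hget
          set f : Int → Int := fun c => pvMacOf mac_key [c] with hf
          have hp : (0:Int) < r - s := by omega
          have hperiodic : f^[(r - s).toNat] c = c := hfix
          rw [fold_range_iterate]
          have hmod : (PySem.Int.mod (rounds - r) (r - s)).toNat =
              (rounds - r).toNat % (r - s).toNat := by
            have h1 : rounds - r = ((rounds - r).toNat : Int) := by omega
            have h2 : r - s = ((r - s).toNat : Int) := by omega
            rw [PySem.Int.mod_eq_emod_of_pos hp]
            conv_lhs => rw [h1, h2]
            rw [← Int.natCast_mod, Int.toNat_natCast]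
          rw [hmod]
          -- f^[N] c = f^[N % P] c from f^[P] c = c
          have key : ∀ (N : Nat), f^[N] c = f^[N % (r - s).toNat] c := by
            intro N
            induction N using Nat.strong_induction_on with
            | _ N ihN =>
              by_cases hN : N < (r - s).toNat
              · rw [Nat.mod_eq_of_lt hN]
              · have hPpos : 0 < (r - s).toNat := by omega
                have hNP : N - (r - s).toNat < N := by omega
                have : N = (N - (r - s).toNat) + (r - s).toNat := by omega
                rw [this, Function.iterate_add_apply, hperiodic, ihN _ hNP,
                  Nat.add_mod_right]
          rw [h]
          show f^[(k + 1) % (r - s).toNat] c = f^[k + 1] c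
          exact (key (k + 1)).symm

-- ===== VERDICT (by name: the statement is the Claim_ definition above) =====
theorem keyed_hash_chain_spec : Claim_equal_keyed_hash_chain := by
  intro msg mac_key rounds _
  unfold Spec_keyed_hash_chain keyed_hash_chain keyed_hash_chain_alt
  rw [mac_eq, loopA_eq mac_key rounds (rounds - 1).toNat _ 1 rfl,
    loopB_eq mac_key rounds (rounds - 1).toNat _ _ 1 rfl]
  intro x s hx
  simp [PySem.Dict.get?_empty] at hx
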